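-- pv_equiv track=rewrite | github.com/andres21feli/ST0245-002 | laboratorios/lab02/ejercicioEnLinea/Array3.py | maxSpan
-- ===== SOURCE A (Python) =====
-- def maxSpan(array):                                       # C0
--     spanF=0                                               # C1
--     for i in range(len(array)):                           # C2 * n
--         for j in range(len(array)):                       # C3 * n * n
--             if array[i] == array[len(array)-1-j]:         # C4 * n^2
--                 span = len(array)-j-i                     # C5 * n^2
--                 spanF = max(span,spanF)                   # C6 * n^2
--     return spanF                                          # C7
-- ===== SOURCE B (Python) =====
-- def maxSpan(array):
--     first = {}
--     best = 0
--     for i, v in enumerate(array):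
--         if v not in first:
--             first[v] = i
--         best = max(best, i - first[v] + 1)
--     return best
-- ===== Notes on version B (the rewrite author's own statement) =====
-- stated objective: faster
-- what changed: Replaced A's double scan over all (i,j) index pairs by a single pass that records each value's first occurrence index in a dict and maximises i - first[v] + 1.
import Mathlib
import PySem

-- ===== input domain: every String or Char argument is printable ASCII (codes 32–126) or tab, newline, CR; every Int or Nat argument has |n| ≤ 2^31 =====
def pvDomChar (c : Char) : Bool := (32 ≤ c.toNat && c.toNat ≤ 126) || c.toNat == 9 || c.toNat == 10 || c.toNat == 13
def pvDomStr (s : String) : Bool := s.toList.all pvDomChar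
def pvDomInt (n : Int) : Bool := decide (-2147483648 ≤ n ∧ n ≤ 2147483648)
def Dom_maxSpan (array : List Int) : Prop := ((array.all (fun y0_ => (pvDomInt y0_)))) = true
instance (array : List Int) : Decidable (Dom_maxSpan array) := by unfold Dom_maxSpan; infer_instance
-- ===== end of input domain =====

-- B replaces A's quadratic double scan by one pass keeping each value's first index in a dict (objective: faster, O(n^2) → O(n)).

-- ===== PORT A =====
-- array[i] and array[len(array)-1-j] are always in range (i, j ∈ [0, n)), so pyGetD with
-- default 0 is exact here.
def maxSpan (array : List Int) : Int :=
  (PySem.List.pyRange 0 (array.length : Int) 1).foldl (fun spanF i =>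
    (PySem.List.pyRange 0 (array.length : Int) 1).foldl (fun spanF j =>
      if PySem.List.pyGetD array i 0 = PySem.List.pyGetD array ((array.length : Int) - 1 - j) 0 then
        max ((array.length : Int) - j - i) spanF
      else spanF) spanF) 0

-- ===== PORT B =====
-- loop body of Source B over list(enumerate(array)): keep dict of first index per value, track best span
def maxSpanAltLoop (pairs : List (Int × Int)) (first : PySem.Dict Int Int) (best : Int) : Int :=
  match pairs with
  | [] => best
  | (i, v) :: rest =>
    let first' := if first.contains v then first else first.insert v i
    maxSpanAltLoop rest first' (max best (i - first'.getD v 0 + 1))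

def maxSpan_alt (array : List Int) : Int :=
  maxSpanAltLoop (PySem.List.enumerate array 0) PySem.Dict.empty 0

-- ===== PRECONDITION & SPEC =====
def Spec_maxSpan (array : List Int) (out : Int) : Prop := out = maxSpan_alt array
instance (array : List Int) (out : Int) : Decidable (Spec_maxSpan array out) := by unfold Spec_maxSpan; infer_instance

-- ===== CLAIM (what is proved, stated in full; the proofs are below) =====
def Claim_equal_maxSpan : Prop := ∀ (array : List Int), Dom_maxSpan array → Spec_maxSpan array (maxSpan array)

-- ===== LEMMAS AND PROOFS =====

-- generic foldl bounds over Int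
theorem pvStepMono (c : Prop) [Decidable c] (v acc : Int) :
    acc ≤ if c then max v acc else acc := by
  split_ifs
  · exact le_max_right _ _
  · exact le_refl _

theorem pvFoldlGeInit {α : Type} (g : Int → α → Int) (hm : ∀ a x, a ≤ g a x) :
    ∀ (l : List α) (s : Int), s ≤ l.foldl g s := by
  intro l
  induction l with
  | nil => intro s; exact le_refl s
  | cons x t ih => intro s; exact le_trans (hm s x) (ih (g s x))

theorem pvFoldlGeElem {α : Type} (g : Int → α → Int) (hm : ∀ a x, a ≤ g a x)
    {v : Int} {x : α} : ∀ (l : List α) (s : Int), x ∈ l → (∀ a, v ≤ g a x) →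
    v ≤ l.foldl g s := by
  intro l
  induction l with
  | nil => intro s h; cases h
  | cons y t ih =>
    intro s hmem hv
    rcases List.mem_cons.mp hmem with h | h
    · subst h; exact le_trans (hv s) (pvFoldlGeInit g hm t (g s x))
    · exact ih (g s y) h hv

theorem pvFoldlLeBound {α : Type} (g : Int → α → Int) {c : Int} :
    ∀ (l : List α) (s : Int), s ≤ c → (∀ a x, x ∈ l → a ≤ c → g a x ≤ c) →
    l.foldl g s ≤ c := by
  intro l
  induction l with
  | nil => intro s hs _; exact hs
  | cons x t ih =>
    intro s hs h
    exact ih (g s x) (h s x (List.mem_cons_self) hs)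
      (fun a y hy ha => h a y (List.mem_cons_of_mem x hy) ha)

-- minimality of idxOf: the first index of l[k]'s value is ≤ k
theorem pvIdxOfGetElemLe : ∀ (l : List Int) (k : Nat) (h : k < l.length), l.idxOf l[k] ≤ k := by
  intro l
  induction l with
  | nil => intro k h; simp at h
  | cons a t ih =>
    intro k h
    cases k with
    | zero => simp
    | succ m =>
      have ht : (a :: t)[m + 1] = t[m]'(by simpa using h) := rfl
      rw [ht]
      by_cases hb : a = t[m]'(by simpa using h)
      · rw [List.idxOf_cons_eq _ hb]
        omega
      · rw [List.idxOf_cons_ne _ hb]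
        exact Nat.succ_le_succ (ih m (by simpa using h))

-- membership description of PySem.List.enumerate
theorem pvMemEnumerate {xs : List Int} :
    ∀ (s : Int) (p : Int × Int), p ∈ PySem.List.enumerate xs s ↔
      ∃ (k : Nat) (h : k < xs.length), p = (s + (k : Int), xs[k]) := by
  induction xs with
  | nil => intro s p; simp [PySem.List.enumerate_nil]
  | cons x t ih =>
    intro s p
    rw [PySem.List.enumerate_cons, List.mem_cons, ih (s + 1)]
    constructor
    · rintro (rfl | ⟨k, hk, rfl⟩)
      · exact ⟨0, by simp, by simp⟩
      · exact ⟨k + 1, by simpa using hk, by simp [Prod.ext_iff]; omega⟩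
    · rintro ⟨k, hk, rfl⟩
      cases k with
      | zero => left; simp
      | succ m =>
        right
        exact ⟨m, by simpa using hk, by simp [Prod.ext_iff]; omega⟩

-- B's loop computes a plain foldl of max over per-index candidates i - idxOf + 1,
-- where idxOf is the first index of the value in the WHOLE array.
theorem pvAltLoopEq (array : List Int) :
    ∀ (l pre : List Int) (d : PySem.Dict Int Int) (best : Int),
      pre ++ l = array →
      (∀ v : Int, d.get? v = if v ∈ pre then some ((pre.idxOf v : Int)) else none) →
      maxSpanAltLoop (PySem.List.enumerate l (pre.length : Int)) d best
        = (PySem.List.enumerate l (pre.length : Int)).foldl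
            (fun b p => max b (p.1 - (array.idxOf p.2 : Int) + 1)) best := by
  intro l
  induction l with
  | nil => intro pre d best _ _; simp [PySem.List.enumerate_nil, maxSpanAltLoop]
  | cons v rest ih =>
    intro pre d best harr hd
    rw [PySem.List.enumerate_cons]
    simp only [maxSpanAltLoop, List.foldl_cons]
    have hcont : d.contains v = (v ∈ pre : Bool) := by
      rw [PySem.Dict.contains_eq_isSome_get?, hd v]
      by_cases hv : v ∈ pre <;> simp [hv]
    by_cases hv : v ∈ pre
    · -- value seen before: dict unchanged, first index comes from pre
      have hidx : array.idxOf v = pre.idxOf v := by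
        rw [← harr, List.idxOf_append_of_mem hv]
      have hfst : (if d.contains v then d else d.insert v (pre.length : Int)) = d := by
        simp [hcont, hv]
      rw [hfst]
      have hget : d.getD v 0 = (pre.idxOf v : Int) := by
        rw [PySem.Dict.getD_eq_get?_getD, hd v]; simp [hv]
      rw [hget, hidx]
      have harr' : (pre ++ [v]) ++ rest = array := by simpa using harr
      have hd' : ∀ w : Int, d.get? w =
          if w ∈ pre ++ [v] then some (((pre ++ [v]).idxOf w : Int)) else none := by
        intro w
        rw [hd w]
        by_cases hw : w ∈ pre
        · simp [hw, List.mem_append, List.idxOf_append_of_mem hw]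
        · by_cases hwv : w = v
          · subst hwv; exact absurd hv hw
          · simp [hw, hwv]
      have := ih (pre ++ [v]) d (max best ((pre.length : Int) - (pre.idxOf v : Int) + 1)) harr' hd'
      simpa [List.length_append] using this
    · -- new value: inserted with index pre.length; in array its first index is pre.length
      have hidx : array.idxOf v = pre.length := by
        rw [← harr, List.idxOf_append_of_notMem hv, List.idxOf_cons_eq _ rfl]
        omega
      have hfst : (if d.contains v then d else d.insert v (pre.length : Int))
          = d.insert v (pre.length : Int) := by simp [hcont, hv]
      rw [hfst]
      have hget : (d.insert v (pre.length : Int)).getD v 0 = (pre.length : Int) := by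
        rw [PySem.Dict.getD_eq_get?_getD, PySem.Dict.get?_insert_self]
        rfl
      rw [hget, hidx]
      have harr' : (pre ++ [v]) ++ rest = array := by simpa using harr
      have hd' : ∀ w : Int, (d.insert v (pre.length : Int)).get? w =
          if w ∈ pre ++ [v] then some (((pre ++ [v]).idxOf w : Int)) else none := by
        intro w
        by_cases hwv : w = v
        · subst hwv
          rw [PySem.Dict.get?_insert_self]
          simp [List.idxOf_append_of_notMem hv, List.idxOf_cons_eq _ rfl]
        · rw [PySem.Dict.get?_insert_of_ne _ _ hwv, hd w]
          by_cases hw : w ∈ pre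
          · simp [hw, List.mem_append, List.idxOf_append_of_mem hw]
          · simp [hw, hwv, List.mem_append]
      have := ih (pre ++ [v]) (d.insert v (pre.length : Int))
        (max best ((pre.length : Int) - (pre.length : Int) + 1)) harr' hd'
      simpa [List.length_append] using this

theorem pvAltEqFoldl (array : List Int) :
    maxSpan_alt array = (PySem.List.enumerate array 0).foldl
      (fun b p => max b (p.1 - (array.idxOf p.2 : Int) + 1)) 0 := by
  have := pvAltLoopEq array array [] PySem.Dict.empty 0 rfl
    (by intro v; simp [PySem.Dict.get?_empty])
  simpa using this

theorem maxSpan_eq_alt (array : List Int) : maxSpan array = maxSpan_alt array := by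
  set n : Int := (array.length : Int) with hn
  rw [pvAltEqFoldl]
  set g : Int → Int × Int → Int := fun b p => max b (p.1 - (array.idxOf p.2 : Int) + 1) with hg
  have hgm : ∀ a x, a ≤ g a x := fun a x => le_max_left _ _
  apply le_antisymm
  · -- A ≤ B
    apply pvFoldlLeBound
    · exact pvFoldlGeInit g hgm _ 0
    · intro a i hi ha
      apply pvFoldlLeBound
      · exact ha
      · intro acc j hj hacc
        split_ifs with hc
        · -- matching pair: candidate n - j - i; let k = n - 1 - j
          rw [PySem.List.mem_pyRange_one] at hi hj
          have hik : (0:Int) ≤ n - 1 - j ∧ n - 1 - j < n := by omega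
          have hgi : PySem.List.pyGetD array i 0 = array[i.toNat]'(by omega) :=
            PySem.List.pyGetD_eq_getElem array 0 hi.1 (by exact_mod_cast hi.2)
          have hgk : PySem.List.pyGetD array (n - 1 - j) 0 = array[(n-1-j).toNat]'(by omega) :=
            PySem.List.pyGetD_eq_getElem array 0 hik.1 (by omega)
          rw [hgi, hgk] at hc
          set k : Nat := (n - 1 - j).toNat with hk
          have hkl : k < array.length := by omega
          have hfi : array.idxOf (array[k]'hkl) ≤ i.toNat := by
            rw [← hc]; exact pvIdxOfGetElemLe array i.toNat (by omega)
          have hcand : ((k : Int), array[k]'hkl) ∈ PySem.List.enumerate array 0 := by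
            rw [pvMemEnumerate]; exact ⟨k, hkl, by simp⟩
          have hB : (k : Int) - (array.idxOf (array[k]'hkl) : Int) + 1
              ≤ (PySem.List.enumerate array 0).foldl g 0 := by
            apply pvFoldlGeElem g hgm _ 0 hcand
            intro a; exact le_max_right _ _
          have : n - j - i ≤ (k : Int) - (array.idxOf (array[k]'hkl) : Int) + 1 := by
            have h1 : (array.idxOf (array[k]'hkl) : Int) ≤ i := by omega
            omega
          exact max_le (le_trans this hB) hacc
        · exact hacc
  · -- B ≤ A
    apply pvFoldlLeBound
    · -- 0 ≤ A
      exact pvFoldlGeInit _ (fun a i => pvFoldlGeInit _ (fun acc j => pvStepMono _ _ _) _ a) _ 0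
    · intro b p hp hb
      rw [pvMemEnumerate] at hp
      obtain ⟨k, hkl, rfl⟩ := hp
      simp only [g, zero_add]
      apply max_le hb
      -- candidate k - idxOf + 1 ≤ A, exhibited at outer i = idxOf, inner j = n - 1 - k
      set v : Int := array[k]'hkl with hv
      have hvmem : v ∈ array := List.getElem_mem hkl
      have hfl : array.idxOf v < array.length := List.idxOf_lt_length_of_mem hvmem
      set f : Nat := array.idxOf v with hf
      have hgf : array[f]'hfl = v := List.getElem_idxOf hfl
      refine pvFoldlGeElem (x := (f : Int)) _
        (fun a i => pvFoldlGeInit _ (fun acc j => pvStepMono _ _ _) _ a) _ 0 ?_ ?_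
      · rw [PySem.List.mem_pyRange_one]
        exact ⟨Int.natCast_nonneg f, by exact_mod_cast hfl⟩
      · intro a
        refine pvFoldlGeElem (x := n - 1 - (k : Int)) _
          (fun acc j => pvStepMono _ _ _) _ a ?_ ?_
        · rw [PySem.List.mem_pyRange_one]; omega
        · intro acc
          have hkk : n - 1 - (n - 1 - (k : Int)) = (k : Int) := by omega
          have hgi : PySem.List.pyGetD array ((f : Nat) : Int) 0 = array[f]'hfl := by
            rw [PySem.List.pyGetD_eq_getElem array 0 (Int.natCast_nonneg f) (by exact_mod_cast hfl)]
            simp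
          have hgk : PySem.List.pyGetD array (n - 1 - (n - 1 - (k : Int))) 0 = array[k]'hkl := by
            rw [hkk, PySem.List.pyGetD_eq_getElem array 0 (Int.natCast_nonneg k) (by exact_mod_cast hkl)]
            simp
          rw [hgi, hgk, hgf]
          rw [if_pos rfl]
          have : n - (n - 1 - (k : Int)) - (f : Int) = (k : Int) - (f : Int) + 1 := by omega
          rw [this]
          exact le_max_left _ _

-- ===== VERDICT (by name: the statement is the Claim_ definition above) =====
theorem maxSpan_spec : Claim_equal_maxSpan := by
  intro array _
  unfold Spec_maxSpan
  exact maxSpan_eq_alt array
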